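-- pv_equiv track=rewrite | github.com/davidrd123/bildung-2.0 | texts/erkenntnisproblem-vol1/scripts/normalize_pages.py | join_wrapped_lines
-- ===== SOURCE A (Python) =====
-- def join_wrapped_lines(lines: list[str]) -> list[str]:
--     paragraphs: list[str] = []
--     current: list[str] = []
--
--     def flush() -> None:
--         if current:
--             paragraphs.append(" ".join(current))
--             current.clear()
--
--     for raw_line in lines:
--         line = " ".join(raw_line.split())
--         if not line:
--             flush()
--             continue
--
--         if not current:
--             current.append(line)
--             continue
--
--         previous = current[-1]
--         if previous.endswith("-") and len(previous) >= 2 and previous[-2].isalpha() and line[0].isalpha():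
--             current[-1] = previous[:-1] + line
--         else:
--             current.append(line)
--
--     flush()
--     return paragraphs
-- ===== SOURCE B (Python) =====
-- def join_wrapped_lines(lines: list[str]) -> list[str]:
--     norm = [" ".join(raw.split()) for raw in lines]
--     out: list[str] = []
--     i, n = 0, len(norm)
--     while i < n:
--         if not norm[i]:
--             i += 1
--             continue
--         buf = list(norm[i])  # paragraph as a character buffer
--         i += 1
--         while i < n and norm[i]:
--             line = norm[i]
--             if buf[-1] == "-" and len(buf) >= 2 and buf[-2].isalpha() and line[0].isalpha():
--                 buf.pop()
--                 buf.extend(line)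
--             else:
--                 buf.append(" ")
--                 buf.extend(line)
--             i += 1
--         out.append("".join(buf))
--     return out
-- ===== Notes on version B (the rewrite author's own statement) =====
-- stated objective: alternative
-- what changed: B first normalizes every line, then runs an index-based two-level scan over the normalized list, growing each paragraph as a single character buffer (hyphen test on the buffer's tail, pop/extend to merge) instead of A's single loop with a piece list, mutable current[-1], flush() closure and final join.
import Mathlib
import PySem

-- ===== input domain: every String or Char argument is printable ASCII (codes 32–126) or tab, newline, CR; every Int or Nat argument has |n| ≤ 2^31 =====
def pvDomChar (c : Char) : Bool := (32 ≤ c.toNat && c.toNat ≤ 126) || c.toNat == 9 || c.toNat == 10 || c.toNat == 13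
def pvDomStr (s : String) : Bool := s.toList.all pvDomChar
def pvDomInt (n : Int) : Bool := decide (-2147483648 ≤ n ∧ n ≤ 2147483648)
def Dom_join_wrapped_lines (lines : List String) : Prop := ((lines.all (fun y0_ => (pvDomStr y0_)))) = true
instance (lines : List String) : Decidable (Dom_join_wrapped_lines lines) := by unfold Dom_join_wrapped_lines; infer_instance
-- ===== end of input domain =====

-- B re-implements A by a different decomposition: normalize all lines first, then an index-free
-- two-level scan that grows each paragraph as ONE string (no piece list, no flush); same output.

-- ===== PORT A =====
-- line = " ".join(raw_line.split())
def pvNormC (raw : List Char) : List Char :=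
  PySem.Chars.join [' '] (PySem.Chars.split₀ raw)

-- the hyphenation condition, textually identical in A (on the last piece) and in B (on the paragraph):
-- x.endswith("-") and len(x) >= 2 and x[-2].isalpha() and line[0].isalpha()
def pvHyphenOk (x line : List Char) : Bool :=
  PySem.Chars.endswith x ['-'] && decide (2 ≤ x.length)
    && ((PySem.List.pyGet? x (-2)).elim false PySem.Chars.isalpha)
    && ((PySem.List.pyGet? line 0).elim false PySem.Chars.isalpha)

-- flush() + return value: paragraphs, plus " ".join(current) if current is non-empty
def pvFlushFin (st : List (List Char) × List (List Char)) : List (List Char) :=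
  if st.2 = [] then st.1 else st.1 ++ [PySem.Chars.join [' '] st.2]

-- A's loop body on the already-normalized line; state = (paragraphs, current)
def pvStepA' (st : List (List Char) × List (List Char)) (line : List Char) :
    List (List Char) × List (List Char) :=
  if line = [] then
    -- flush()
    (if st.2 = [] then st else (st.1 ++ [PySem.Chars.join [' '] st.2], []))
  else if st.2 = [] then (st.1, [line])
  else
    let previous := st.2.getLastD []
    if pvHyphenOk previous line then
      (st.1, st.2.dropLast ++ [previous.dropLast ++ line])   -- current[-1] = previous[:-1] + line
    else
      (st.1, st.2 ++ [line])

def join_wrapped_lines (lines : List String) : List String :=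
  (pvFlushFin ((lines.map String.toList).foldl (fun s raw => pvStepA' s (pvNormC raw)) ([], []))).map
    (fun cs => String.ofList cs)

-- ===== PORT B =====
-- Source B's hyphen test on the paragraph buffer:
-- buf[-1] == "-" and len(buf) >= 2 and buf[-2].isalpha() and line[0].isalpha()
def pvHyphenOkB (buf line : List Char) : Bool :=
  (PySem.List.pyGet? buf (-1) == some '-') && decide (2 ≤ buf.length)
    && ((PySem.List.pyGet? buf (-2)).elim false PySem.Chars.isalpha)
    && ((PySem.List.pyGet? line 0).elim false PySem.Chars.isalpha)

-- merge step of Source B's inner while loop (buf.pop(); buf.extend(line) / buf.append(" "); buf.extend(line))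
def pvMergeB (para line : List Char) : List Char :=
  if pvHyphenOkB para line then para.dropLast ++ line else (para ++ [' ']) ++ line

-- inner while loop: consume non-blank lines into para, stop (without consuming) at a blank
def pvTakeB (para : List Char) : List (List Char) → List Char × List (List Char)
  | [] => (para, [])
  | l :: rest => if l = [] then (para, l :: rest) else pvTakeB (pvMergeB para l) rest

theorem pvTakeB_length_le (para : List Char) (xs : List (List Char)) :
    (pvTakeB para xs).2.length ≤ xs.length := by
  induction xs generalizing para with
  | nil => simp [pvTakeB]
  | cons l rest ih =>
      by_cases h : l = []
      · simp [pvTakeB, h]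
      · simp only [pvTakeB, if_neg h]
        exact le_trans (ih _) (by simp)

-- outer while loop over the normalized lines
def pvGoB (xs : List (List Char)) : List (List Char) :=
  match xs with
  | [] => []
  | l :: rest =>
      if l = [] then pvGoB rest
      else (pvTakeB l rest).1 :: pvGoB (pvTakeB l rest).2
termination_by xs.length
decreasing_by
  · simp
  · have := pvTakeB_length_le l rest
    simp only [List.length_cons]
    omega

def join_wrapped_lines_alt (lines : List String) : List String :=
  (pvGoB (((lines.map String.toList).map pvNormC))).map (fun cs => String.ofList cs)

-- ===== PRECONDITION & SPEC =====
def Spec_join_wrapped_lines (lines : List String) (out : List String) : Prop := out = join_wrapped_lines_alt lines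
instance (lines : List String) (out : List String) : Decidable (Spec_join_wrapped_lines lines out) := by unfold Spec_join_wrapped_lines; infer_instance

-- ===== CLAIM (what is proved, stated in full; the proofs are below) =====
def Claim_equal_join_wrapped_lines : Prop := ∀ (lines : List String), Dom_join_wrapped_lines lines → Spec_join_wrapped_lines lines (join_wrapped_lines lines)

-- ===== LEMMAS AND PROOFS =====

theorem pvSuffix_single_iff (c : Char) (s : List Char) : [c] <:+ s ↔ s.getLast? = some c := by
  constructor
  · rintro ⟨t, rfl⟩; exact List.getLast?_concat
  · intro h
    obtain ⟨ys, rfl⟩ := List.getLast?_eq_some_iff.mp h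
    exact ⟨ys, rfl⟩

theorem pvEndswith_single (s : List Char) (c : Char) :
    PySem.Chars.endswith s [c] = decide (s.getLast? = some c) := by
  rw [Bool.eq_iff_iff, PySem.Chars.endswith_iff, decide_eq_true_eq, pvSuffix_single_iff]

theorem pvGet_neg_two (xs : List Char) (h : 2 ≤ xs.length) :
    PySem.List.pyGet? xs (-2) = xs[xs.length - 2]? := by
  simp only [PySem.List.pyGet?, PySem.List.pyIdx?]
  rw [if_neg (by omega), if_pos (by omega)]
  simp

theorem pvGet_neg_one (xs : List Char) : PySem.List.pyGet? xs (-1) = xs.getLast? := by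
  simp only [PySem.List.pyGet?, PySem.List.pyIdx?]
  by_cases h : xs = []
  · subst h; simp
  · have hl : 0 < xs.length := List.length_pos_of_ne_nil h
    rw [if_neg (by omega), if_pos (by omega)]
    simp [List.getLast?_eq_getElem?]

-- Source B's buffer test equals A's piece test, as a function of the same string
theorem pvHyphenOkB_eq (x l : List Char) : pvHyphenOkB x l = pvHyphenOk x l := by
  unfold pvHyphenOkB pvHyphenOk
  rw [pvEndswith_single, pvGet_neg_one]
  have hbe : (x.getLast? == some '-') = decide (x.getLast? = some '-') := by
    rw [Bool.eq_iff_iff]; simp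
  rw [hbe]

-- the hyphen test on the last piece = the hyphen test on the whole joined paragraph
theorem pvHyphenOk_para (pre v l : List Char) (hv : v ≠ [])
    (hpre : pre = [] ∨ ∃ q, pre = q ++ [' ']) :
    pvHyphenOk (pre ++ v) l = pvHyphenOk v l := by
  unfold pvHyphenOk
  by_cases h2 : 2 ≤ v.length
  · have e1 : decide (2 ≤ (pre ++ v).length) = true := by simp; omega
    have e2 : decide (2 ≤ v.length) = true := decide_eq_true h2
    have e3 : PySem.List.pyGet? (pre ++ v) (-2) = PySem.List.pyGet? v (-2) := by
      rw [pvGet_neg_two _ (by simp; omega), pvGet_neg_two _ h2,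
        List.getElem?_append_right (by simp; omega)]
      congr 1
      simp; omega
    have e4 : PySem.Chars.endswith (pre ++ v) ['-'] = PySem.Chars.endswith v ['-'] := by
      rw [pvEndswith_single, pvEndswith_single, List.getLast?_append_of_ne_nil _ hv]
    rw [e1, e2, e3, e4]
  · have h1 : v.length = 1 := by
      have := List.length_pos_of_ne_nil hv; omega
    obtain ⟨c, rfl⟩ := List.length_eq_one_iff.mp h1
    rcases hpre with rfl | ⟨q, rfl⟩
    · simp
    · have hlen : 2 ≤ (q ++ [' '] ++ [c]).length := by simp
      have hidx : (q ++ [' '] ++ [c]).length - 2 = q.length := by simp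
      have e : (PySem.List.pyGet? (q ++ [' '] ++ [c]) (-2)).elim false PySem.Chars.isalpha = false := by
        rw [pvGet_neg_two _ hlen, hidx, List.append_assoc,
          List.getElem?_append_right (le_refl _)]
        have hsp : PySem.Chars.isalpha ' ' = false := by decide
        simp [hsp]
      rw [e]
      simp

-- join over a snoc
theorem pvJoin_concat : ∀ (ps : List (List Char)) (x : List Char),
    PySem.Chars.join [' '] (ps ++ [x]) =
      if ps = [] then x else PySem.Chars.join [' '] ps ++ [' '] ++ x
  | [], x => by simp [PySem.Chars.join_singleton]
  | [p], x => by simp [PySem.Chars.join_cons_cons, PySem.Chars.join_singleton]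
  | p :: q :: ps, x => by
      have ih := pvJoin_concat (q :: ps) x
      simp only [List.cons_append, PySem.Chars.join_cons_cons] at ih ⊢
      rw [ih]
      simp [List.append_assoc]

-- the main invariant: A's fold, flushed, equals B's scan
theorem pvMain : ∀ (n : ℕ) (ns : List (List Char)), ns.length ≤ n →
    (∀ ps, pvFlushFin (ns.foldl pvStepA' (ps, [])) = ps ++ pvGoB ns)
    ∧ (∀ ps cur, cur ≠ [] → (∀ p ∈ cur, p ≠ []) →
        pvFlushFin (ns.foldl pvStepA' (ps, cur)) =
          ps ++ ((pvTakeB (PySem.Chars.join [' '] cur) ns).1 ::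
                 pvGoB (pvTakeB (PySem.Chars.join [' '] cur) ns).2)) := by
  intro n
  induction n with
  | zero =>
      intro ns hle
      have : ns = [] := List.length_eq_zero_iff.mp (Nat.le_zero.mp hle)
      subst this
      refine ⟨fun ps => by simp [pvFlushFin, pvGoB], fun ps cur hc _ => ?_⟩
      simp [pvFlushFin, pvTakeB, pvGoB, hc]
  | succ n ih =>
      intro ns hle
      match ns with
      | [] =>
          refine ⟨fun ps => by simp [pvFlushFin, pvGoB], fun ps cur hc _ => ?_⟩
          simp [pvFlushFin, pvTakeB, pvGoB, hc]
      | l :: rest =>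
          have hr : rest.length ≤ n := by simpa using hle
          constructor
          · intro ps
            by_cases hl : l = []
            · subst hl
              have hstep : pvStepA' (ps, ([] : List (List Char))) [] = (ps, []) := by
                simp [pvStepA']
              rw [List.foldl_cons, hstep, (ih rest hr).1 ps]
              conv_rhs => rw [pvGoB]
              simp
            · have hstep : pvStepA' (ps, ([] : List (List Char))) l = (ps, [l]) := by
                simp [pvStepA', hl]
              rw [List.foldl_cons, hstep,
                (ih rest hr).2 ps [l] (by simp) (by simpa using hl),
                PySem.Chars.join_singleton]
              conv_rhs => rw [pvGoB]
              rw [if_neg hl]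
          · intro ps cur hc hne
            by_cases hl : l = []
            · subst hl
              have hstep : pvStepA' (ps, cur) [] = (ps ++ [PySem.Chars.join [' '] cur], []) := by
                simp [pvStepA', hc]
              rw [List.foldl_cons, hstep, (ih rest hr).1, pvTakeB, if_pos rfl]
              conv_rhs => rw [pvGoB]
              simp [List.append_assoc]
            · obtain ⟨F, v, hcv⟩ := (List.eq_nil_or_concat cur).resolve_left hc
              rw [List.concat_eq_append] at hcv
              subst hcv
              have hv : v ≠ [] := hne v (by simp)
              have hJ : PySem.Chars.join [' '] (F ++ [v]) =
                  (if F = [] then ([] : List Char) else PySem.Chars.join [' '] F ++ [' ']) ++ v := by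
                rw [pvJoin_concat]
                by_cases hF : F = [] <;> simp [hF, List.append_assoc]
              have hpred : pvHyphenOk (PySem.Chars.join [' '] (F ++ [v])) l = pvHyphenOk v l := by
                rw [hJ]
                exact pvHyphenOk_para _ v l hv (by by_cases hF : F = [] <;> simp [hF])
              have hstep : pvStepA' (ps, F ++ [v]) l =
                  if pvHyphenOk v l = true then (ps, F ++ [v.dropLast ++ l])
                  else (ps, (F ++ [v]) ++ [l]) := by
                simp [pvStepA', hl]
              rw [List.foldl_cons, hstep, pvTakeB, if_neg hl]
              by_cases hm : pvHyphenOk v l = true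
              · rw [if_pos hm]
                have hcur' : ∀ p ∈ F ++ [v.dropLast ++ l], p ≠ [] := by
                  intro p hp
                  rcases List.mem_append.mp hp with hp | hp
                  · exact hne p (List.mem_append.mpr (Or.inl hp))
                  · simp at hp; subst hp; simp [hl]
                rw [(ih rest hr).2 ps (F ++ [v.dropLast ++ l]) (by simp) hcur']
                have h1 : pvMergeB (PySem.Chars.join [' '] (F ++ [v])) l =
                    (PySem.Chars.join [' '] (F ++ [v])).dropLast ++ l := by
                  rw [pvMergeB, if_pos (by rw [pvHyphenOkB_eq, hpred]; exact hm)]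
                have hJ' : PySem.Chars.join [' '] (F ++ [v.dropLast ++ l]) =
                    pvMergeB (PySem.Chars.join [' '] (F ++ [v])) l := by
                  rw [h1, hJ, List.dropLast_append_of_ne_nil hv, pvJoin_concat]
                  by_cases hF : F = [] <;> simp [hF, List.append_assoc]
                rw [hJ']
              · rw [if_neg hm]
                have hcur' : ∀ p ∈ (F ++ [v]) ++ [l], p ≠ [] := by
                  intro p hp
                  rcases List.mem_append.mp hp with hp | hp
                  · exact hne p hp
                  · simp at hp; subst hp; exact hl
                rw [(ih rest hr).2 ps ((F ++ [v]) ++ [l]) (by simp) hcur']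
                have h1 : pvMergeB (PySem.Chars.join [' '] (F ++ [v])) l =
                    PySem.Chars.join [' '] (F ++ [v]) ++ [' '] ++ l := by
                  rw [pvMergeB, if_neg (by rw [pvHyphenOkB_eq, hpred]; exact hm)]
                have hJ' : PySem.Chars.join [' '] ((F ++ [v]) ++ [l]) =
                    pvMergeB (PySem.Chars.join [' '] (F ++ [v])) l := by
                  rw [h1, pvJoin_concat, if_neg (by simp)]
                rw [hJ']

-- ===== VERDICT (by name: the statement is the Claim_ definition above) =====
theorem join_wrapped_lines_spec : Claim_equal_join_wrapped_lines := by
  intro lines _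
  unfold Spec_join_wrapped_lines join_wrapped_lines join_wrapped_lines_alt
  rw [show (lines.map String.toList).foldl (fun s raw => pvStepA' s (pvNormC raw)) ([], []) =
      ((lines.map String.toList).map pvNormC).foldl pvStepA' ([], []) from (List.foldl_map).symm]
  rw [(pvMain ((lines.map String.toList).map pvNormC).length
      ((lines.map String.toList).map pvNormC) le_rfl).1 []]
  simp
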